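-- pv_equiv track=rewrite | github.com/vgcman16/OpenNXT | tools/launch_runescape_wrapper_rewrite.py | tokenize_windows_command_line
-- ===== SOURCE A (Python) =====
-- def tokenize_windows_command_line(command_line: str) -> list[str]:
--     tokens: list[str] = []
--     current: list[str] = []
--     in_quotes = False
--     token_started = False
--     index = 0
--     length = len(command_line)
--     while index < length:
--         character = command_line[index]
--         if character == '"':
--             in_quotes = not in_quotes
--             token_started = True
--             index += 1
--             continue
--         if character.isspace() and not in_quotes:
--             if token_started:
--                 tokens.append("".join(current))
--                 current.clear()
--                 token_started = False
--             index += 1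
--             continue
--         current.append(character)
--         token_started = True
--         index += 1
--     if token_started:
--         tokens.append("".join(current))
--     return tokens
-- ===== SOURCE B (Python) =====
-- def tokenize_windows_command_line(command_line: str) -> list[str]:
--     tokens: list[str] = []
--     i = 0
--     n = len(command_line)
--     while i < n:
--         if command_line[i].isspace():
--             i += 1
--             continue
--         # read one maximal token: quoted segments are jumped over via find()
--         parts: list[str] = []
--         j = i
--         while j < n:
--             c = command_line[j]
--             if c == '"':
--                 end = command_line.find('"', j + 1)
--                 if end == -1:
--                     parts.append(command_line[j + 1:])
--                     j = n
--                 else: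
--                     parts.append(command_line[j + 1:end])
--                     j = end + 1
--             elif c.isspace():
--                 break
--             else:
--                 parts.append(c)
--                 j += 1
--         tokens.append("".join(parts))
--         i = j
--     return tokens
-- ===== Notes on version B (the rewrite author's own statement) =====
-- stated objective: alternative
-- what changed: Replaces A's character-at-a-time state machine with in_quotes/token_started boolean flags by a recursive-descent tokenizer that skips separators and consumes one whole token at a time, jumping over each quoted segment with str.find and slicing.
import Mathlib
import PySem

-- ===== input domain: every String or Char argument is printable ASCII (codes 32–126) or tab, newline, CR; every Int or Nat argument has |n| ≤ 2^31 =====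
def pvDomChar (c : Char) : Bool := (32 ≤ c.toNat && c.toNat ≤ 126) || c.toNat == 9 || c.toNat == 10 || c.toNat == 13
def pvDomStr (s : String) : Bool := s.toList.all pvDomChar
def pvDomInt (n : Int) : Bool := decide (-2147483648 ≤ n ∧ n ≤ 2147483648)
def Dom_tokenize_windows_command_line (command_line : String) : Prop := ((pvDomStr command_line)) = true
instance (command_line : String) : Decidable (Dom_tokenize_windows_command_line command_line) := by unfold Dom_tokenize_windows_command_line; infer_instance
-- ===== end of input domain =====

-- ===== PORT A =====
-- B replaces A's single character-at-a-time state machine (in_quotes/token_started flags)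
-- by a recursive-descent tokenizer: skip separators, consume one whole token at a time,
-- jumping over each quoted segment with find/slice (objective: alternative).
-- Port of A: the while-loop as tail recursion over the character list with the same state.
def aLoop : List Char → List String → List Char → Bool → Bool → List String
  | [], toks, cur, _inq, ts => if ts then toks ++ [String.ofList cur] else toks
  | c :: rest, toks, cur, inq, ts =>
    if c = '"' then aLoop rest toks cur (!inq) true
    else if PySem.Chars.isspace c && !inq then
      if ts then aLoop rest (toks ++ [String.ofList cur]) [] inq false
      else aLoop rest toks cur inq false
    else aLoop rest toks (cur ++ [c]) inq true

def tokenize_windows_command_line (command_line : String) : List String :=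
  aLoop command_line.toList [] [] false false

-- ===== PORT B =====
-- Inner while-loop of B: consume one maximal token starting here; on '"' Python jumps to the
-- next '"' via command_line.find('"', j+1) and slices the segment out — on the character
-- list that find/slice pair is exactly takeWhile/dropWhile on the tail (exact).
def altMatch : List Char → List Char × List Char
  | [] => ([], [])
  | c :: rest =>
    if c = '"' then
      match h : rest.dropWhile (· ≠ '"') with
      | [] => (rest.takeWhile (· ≠ '"'), [])           -- find returned -1: take the rest, j = n
      | _ :: r2 =>                                      -- closing quote found: slice, j = end+1
        let p := altMatch r2
        (rest.takeWhile (· ≠ '"') ++ p.1, p.2)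
    else if PySem.Chars.isspace c then ([], c :: rest)
    else
      let p := altMatch rest
      (c :: p.1, p.2)
termination_by xs => xs.length
decreasing_by
  · have hl := List.length_dropWhile_le (l := rest) (p := (· ≠ '"'))
    rw [h] at hl
    simp at hl ⊢
    omega
  · simp

-- cited by altGo's decreasing_by: past one consumed token the remainder strictly shrinks
theorem altMatch_snd_le_aux (n : Nat) : ∀ xs : List Char, xs.length ≤ n → (altMatch xs).2.length ≤ xs.length := by
  induction n with
  | zero =>
    intro xs h
    match xs with
    | [] => simp [altMatch]
  | succ n ih =>
    intro xs hlen
    match xs with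
    | [] => simp [altMatch]
    | c :: rest =>
      by_cases hq : c = '"'
      · subst hq
        rw [altMatch.eq_def]
        simp only []
        cases hdrop : rest.dropWhile (· ≠ '"') with
        | nil => simp
        | cons y r2 =>
          have h2 := List.length_dropWhile_le (l := rest) (p := (· ≠ '"'))
          rw [hdrop] at h2
          simp at h2
          simp at hlen
          have h3 := ih r2 (by omega)
          simp
          omega
      · by_cases hs : PySem.Chars.isspace c
        · simp [altMatch, hq, hs]
        · simp at hlen
          have h3 := ih rest (by omega)
          simp [altMatch, hq, hs]
          omega

theorem altMatch_cons_snd_le (c : Char) (rest : List Char) (hs : PySem.Chars.isspace c = false) :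
    (altMatch (c :: rest)).2.length ≤ rest.length := by
  by_cases hq : c = '"'
  · subst hq
    rw [altMatch.eq_def]
    simp only []
    cases hdrop : rest.dropWhile (· ≠ '"') with
    | nil => simp
    | cons y r2 =>
      have h1 := altMatch_snd_le_aux r2.length r2 le_rfl
      have h2 := List.length_dropWhile_le (l := rest) (p := (· ≠ '"'))
      rw [hdrop] at h2
      simp at h2
      simp
      omega
  · have h1 := altMatch_snd_le_aux rest.length rest le_rfl
    simp [altMatch, hq, hs]
    omega

-- Outer while-loop of B: skip separators, emit one token per altMatch run.
def altGo : List Char → List String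
  | [] => []
  | c :: rest =>
    if PySem.Chars.isspace c then altGo rest
    else String.ofList (altMatch (c :: rest)).1 :: altGo (altMatch (c :: rest)).2
termination_by xs => xs.length
decreasing_by
  · simp
  · rename_i hs
    have := altMatch_cons_snd_le c rest (by simpa using hs)
    simp
    omega

def tokenize_windows_command_line_alt (command_line : String) : List String :=
  altGo command_line.toList

-- ===== PRECONDITION & SPEC =====
def Spec_tokenize_windows_command_line (command_line : String) (out : List String) : Prop := out = tokenize_windows_command_line_alt command_line
instance (command_line : String) (out : List String) : Decidable (Spec_tokenize_windows_command_line command_line out) := by unfold Spec_tokenize_windows_command_line; infer_instance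

-- ===== CLAIM (what is proved, stated in full; the proofs are below) =====
def Claim_equal_tokenize_windows_command_line : Prop := ∀ (command_line : String), Dom_tokenize_windows_command_line command_line → Spec_tokenize_windows_command_line command_line (tokenize_windows_command_line command_line)

-- ===== LEMMAS AND PROOFS =====

-- one-step unfolding lemmas for the B-side recursions
theorem altMatch_quote_nil {rest : List Char} (hdrop : rest.dropWhile (· ≠ '"') = []) :
    altMatch ('"' :: rest) = (rest.takeWhile (· ≠ '"'), []) := by
  rw [altMatch.eq_def]
  simp only []
  cases h2 : rest.dropWhile (· ≠ '"') with
  | nil => simp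
  | cons y2 r22 => rw [hdrop] at h2; cases h2

theorem altMatch_quote_cons {rest : List Char} {y : Char} {r2 : List Char}
    (hdrop : rest.dropWhile (· ≠ '"') = y :: r2) :
    altMatch ('"' :: rest) = (rest.takeWhile (· ≠ '"') ++ (altMatch r2).1, (altMatch r2).2) := by
  rw [altMatch.eq_def]
  simp only []
  cases h2 : rest.dropWhile (· ≠ '"') with
  | nil => rw [hdrop] at h2; cases h2
  | cons y2 r22 =>
    rw [hdrop] at h2
    injection h2 with h3 h4
    subst h4
    simp

theorem altMatch_space {c : Char} {rest : List Char}
    (hq : c ≠ '"') (hs : PySem.Chars.isspace c = true) :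
    altMatch (c :: rest) = ([], c :: rest) := by
  rw [altMatch.eq_def]
  simp [hq, hs]

theorem altMatch_char {c : Char} {rest : List Char}
    (hq : c ≠ '"') (hs : PySem.Chars.isspace c = false) :
    altMatch (c :: rest) = (c :: (altMatch rest).1, (altMatch rest).2) := by
  rw [altMatch.eq_def]
  simp [hq, hs]

theorem altGo_cons_space {c : Char} {rest : List Char} (hs : PySem.Chars.isspace c = true) :
    altGo (c :: rest) = altGo rest := by
  rw [altGo.eq_def]
  simp [hs]

theorem altGo_cons_tok {c : Char} {rest : List Char} (hs : PySem.Chars.isspace c = false) :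
    altGo (c :: rest) = String.ofList (altMatch (c :: rest)).1 :: altGo (altMatch (c :: rest)).2 := by
  rw [altGo.eq_def]
  simp [hs]

theorem isspace_quote : PySem.Chars.isspace '"' = false := by decide

-- Joint invariant over A's three reachable loop modes:
--  S: between tokens (cur = [], in_quotes = false, token_started = false)
--  M: inside a token, outside quotes;  Q: inside a token, inside quotes
def ModeInv (s : List Char) : Prop :=
  (∀ toks, aLoop s toks [] false false = toks ++ altGo s) ∧
  (∀ toks cur, aLoop s toks cur false true =
      toks ++ String.ofList (cur ++ (altMatch s).1) :: altGo (altMatch s).2) ∧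
  (∀ toks cur, aLoop s toks cur true true =
      match s.dropWhile (· ≠ '"') with
      | [] => toks ++ [String.ofList (cur ++ s.takeWhile (· ≠ '"'))]
      | _ :: r2 => toks ++ String.ofList (cur ++ s.takeWhile (· ≠ '"') ++ (altMatch r2).1)
                     :: altGo (altMatch r2).2)

theorem modeInv (s : List Char) : ModeInv s := by
  induction s with
  | nil =>
    refine ⟨fun toks => ?_, fun toks cur => ?_, fun toks cur => ?_⟩ <;>
      simp [aLoop, altGo, altMatch]
  | cons c rest ih =>
    obtain ⟨ihS, ihM, ihQ⟩ := ih
    refine ⟨fun toks => ?_, fun toks cur => ?_, fun toks cur => ?_⟩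
    · -- S mode
      by_cases hq : c = '"'
      · subst hq
        rw [show aLoop ('"' :: rest) toks [] false false = aLoop rest toks [] true true by
              simp [aLoop]]
        rw [ihQ, altGo_cons_tok isspace_quote]
        cases hdrop : rest.dropWhile (· ≠ '"') with
        | nil => rw [altMatch_quote_nil hdrop]; simp [altGo]
        | cons y r2 => rw [altMatch_quote_cons hdrop]; simp
      · by_cases hs : PySem.Chars.isspace c
        · rw [show aLoop (c :: rest) toks [] false false = aLoop rest toks [] false false by
                simp [aLoop, hq, hs]]
          rw [ihS, altGo_cons_space hs]
        · rw [show aLoop (c :: rest) toks [] false false = aLoop rest toks [c] false true by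
                simp [aLoop, hq, hs]]
          rw [ihM, altGo_cons_tok (by simpa using hs), altMatch_char hq (by simpa using hs)]
          simp
    · -- M mode
      by_cases hq : c = '"'
      · subst hq
        rw [show aLoop ('"' :: rest) toks cur false true = aLoop rest toks cur true true by
              simp [aLoop]]
        rw [ihQ]
        cases hdrop : rest.dropWhile (· ≠ '"') with
        | nil => rw [altMatch_quote_nil hdrop]; simp [altGo]
        | cons y r2 => rw [altMatch_quote_cons hdrop]; simp
      · by_cases hs : PySem.Chars.isspace c
        · rw [show aLoop (c :: rest) toks cur false true
                = aLoop rest (toks ++ [String.ofList cur]) [] false false by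
                simp [aLoop, hq, hs]]
          rw [ihS, altMatch_space hq hs, altGo_cons_space hs]
          simp
        · rw [show aLoop (c :: rest) toks cur false true
                = aLoop rest toks (cur ++ [c]) false true by
                simp [aLoop, hq, hs]]
          rw [ihM, altMatch_char hq (by simpa using hs)]
          simp
    · -- Q mode
      by_cases hq : c = '"'
      · subst hq
        rw [show aLoop ('"' :: rest) toks cur true true = aLoop rest toks cur false true by
              simp [aLoop]]
        rw [ihM]
        simp
      · rw [show aLoop (c :: rest) toks cur true true
              = aLoop rest toks (cur ++ [c]) true true by
              simp [aLoop, hq]]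
        rw [ihQ]
        have ht : (c :: rest).takeWhile (· ≠ '"') = c :: rest.takeWhile (· ≠ '"') := by
          simp [hq]
        have hd : (c :: rest).dropWhile (· ≠ '"') = rest.dropWhile (· ≠ '"') := by
          simp [hq]
        rw [ht, hd]
        cases hdrop : rest.dropWhile (· ≠ '"') with
        | nil => simp
        | cons y r2 => simp

-- ===== VERDICT (by name: the statement is the Claim_ definition above) =====
theorem tokenize_windows_command_line_spec : Claim_equal_tokenize_windows_command_line := by
  intro s _hdom
  unfold Spec_tokenize_windows_command_line tokenize_windows_command_line tokenize_windows_command_line_alt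
  simpa using (modeInv s.toList).1 []
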